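-- pv_equiv track=rewrite | github.com/abbas-rz/Stutra | scripts/migrate_sections_enhanced.py | extract_section_name
-- ===== SOURCE A (Python) =====
-- def extract_section_name(filename: str) -> str:
--     """Extract section name from filename and format consistently"""
--     # Remove .csv extension
--     name = filename.replace('.csv', '')
--
--     # Handle special cases and extract clean section name
--     name_mapping = {
--         'amartya': 'Amartya',
--         'ambedkar': 'Ambedkar',
--         'curie': 'Curie',
--         'eliot': 'Eliot',
--         'hawking': 'Hawking',
--         'lewis': 'Lewis',
--         'raman': 'Raman',
--         'satyarthi': 'Satyarthi',
--         'tagore': 'Tagore',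
--         'yunus': 'Yunus'
--     }
--
--     # Extract base name (remove numbers)
--     base_name = ''.join(char for char in name if not char.isdigit()).strip().lower()
--
--     # Get proper case name
--     proper_name = name_mapping.get(base_name, base_name.capitalize())
--
--     return f"XI {proper_name}"
-- ===== SOURCE B (Python) =====
-- def extract_section_name(filename: str) -> str:
--     """Extract section name from filename and format consistently"""
--     base = filename.replace('.csv', '')
--     base = ''.join(c for c in base if not c.isdigit()).strip().lower()
--     return f"XI {base.capitalize()}"
-- ===== Notes on version B (the rewrite author's own statement) =====
-- stated objective: simpler
-- what changed: B drops the 10-entry name_mapping dict and its lookup-with-fallback entirely: every mapping value equals the capitalized key, so after the same digit-strip/strip/lower pipeline B returns the prefix plus the capitalized base name directly.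
import Mathlib
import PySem

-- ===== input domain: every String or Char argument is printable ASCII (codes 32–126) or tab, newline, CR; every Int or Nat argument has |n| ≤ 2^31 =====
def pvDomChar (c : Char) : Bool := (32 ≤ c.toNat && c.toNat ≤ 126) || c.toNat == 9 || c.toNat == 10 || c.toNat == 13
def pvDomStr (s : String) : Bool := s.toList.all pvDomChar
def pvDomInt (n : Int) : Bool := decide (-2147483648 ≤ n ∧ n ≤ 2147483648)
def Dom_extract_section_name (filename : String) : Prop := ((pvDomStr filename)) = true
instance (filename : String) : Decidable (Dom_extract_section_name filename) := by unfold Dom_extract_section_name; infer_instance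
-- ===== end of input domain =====

-- B drops A's 10-entry name_mapping dict: every mapping value equals the capitalized key,
-- so B returns "XI " ++ capitalize(base) directly (objective: simpler).

-- str.capitalize(): first char uppercased, rest lowercased (exact on the ASCII domain).
def pvCapitalize (s : String) : String :=
  match s.toList with
  | [] => ""
  | c :: rest => String.ofList (PySem.Chars.upperChar c :: rest.map PySem.Chars.lowerChar)

-- ===== PORT A =====
def extract_section_name (filename : String) : String :=
  let name := PySem.Str.replace filename ".csv" ""
  let name_mapping : PySem.Dict String String := PySem.Dict.ofList
    [("amartya", "Amartya"), ("ambedkar", "Ambedkar"), ("curie", "Curie"),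
     ("eliot", "Eliot"), ("hawking", "Hawking"), ("lewis", "Lewis"),
     ("raman", "Raman"), ("satyarthi", "Satyarthi"), ("tagore", "Tagore"),
     ("yunus", "Yunus")]
  let base_name := PySem.Str.lower (PySem.Str.strip
    (String.ofList (name.toList.filter (fun c => !PySem.Chars.isdigit c))))
  let proper_name := name_mapping.getD base_name (pvCapitalize base_name)
  "XI " ++ proper_name

-- ===== PORT B =====
def extract_section_name_alt (filename : String) : String :=
  let base := PySem.Str.lower (PySem.Str.strip
    (String.ofList ((PySem.Str.replace filename ".csv" "").toList.filter
      (fun c => !PySem.Chars.isdigit c))))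
  "XI " ++ pvCapitalize base

-- ===== PRECONDITION & SPEC =====
def Spec_extract_section_name (filename : String) (out : String) : Prop := out = extract_section_name_alt filename
instance (filename : String) (out : String) : Decidable (Spec_extract_section_name filename out) := by unfold Spec_extract_section_name; infer_instance

-- ===== CLAIM (what is proved, stated in full; the proofs are below) =====
def Claim_equal_extract_section_name : Prop := ∀ (filename : String), Dom_extract_section_name filename → Spec_extract_section_name filename (extract_section_name filename)

-- ===== LEMMAS AND PROOFS =====

-- The mapping lookup is a no-op: every value in name_mapping is the capitalization of its key.
theorem mapping_getD_eq_cap (b : String) :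
    (PySem.Dict.ofList
      [("amartya", "Amartya"), ("ambedkar", "Ambedkar"), ("curie", "Curie"),
       ("eliot", "Eliot"), ("hawking", "Hawking"), ("lewis", "Lewis"),
       ("raman", "Raman"), ("satyarthi", "Satyarthi"), ("tagore", "Tagore"),
       ("yunus", "Yunus")] : PySem.Dict String String).getD b (pvCapitalize b)
      = pvCapitalize b := by
  show ((((((((((PySem.Dict.empty.insert "amartya" "Amartya").insert "ambedkar" "Ambedkar").insert
      "curie" "Curie").insert "eliot" "Eliot").insert "hawking" "Hawking").insert
      "lewis" "Lewis").insert "raman" "Raman").insert "satyarthi" "Satyarthi").insert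
      "tagore" "Tagore").insert "yunus" "Yunus").getD b (pvCapitalize b) = pvCapitalize b
  simp only [PySem.Dict.getD_insert, PySem.Dict.getD_empty]
  split_ifs with h1 h2 h3 h4 h5 h6 h7 h8 h9 h10 <;>
    first
      | rfl
      | (subst h1; rfl) | (subst h2; rfl) | (subst h3; rfl) | (subst h4; rfl)
      | (subst h5; rfl) | (subst h6; rfl) | (subst h7; rfl) | (subst h8; rfl)
      | (subst h9; rfl) | (subst h10; rfl)

-- ===== VERDICT (by name: the statement is the Claim_ definition above) =====
theorem extract_section_name_spec : Claim_equal_extract_section_name := by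
  intro filename _
  unfold Spec_extract_section_name extract_section_name extract_section_name_alt
  simp only [mapping_getD_eq_cap]
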